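-- pv_equiv track=rewrite | github.com/djcline23/conversion-mcgrath | src/main/predict.py | findBestCut
-- ===== SOURCE A (Python) =====
-- def findBestCut(sequence, oldPred, newPred):
-- 	"""Finds the cut point to transition from oldPred to newPred"""
-- 	bestCut = 0
-- 	bestWrong = len(sequence) + 1
--
-- 	for i in range(len(sequence)):
-- 		wrong = callWrong(sequence[:i], oldPred) + callWrong(sequence[i:], newPred)
--
-- 		if wrong < bestWrong:
-- 			bestCut = i
-- 			bestWrong = wrong
--
-- 	return bestCut
--
-- def callWrong(sequence, pred):
-- 	"""Returns the number of sites that disagree with the given prediction"""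
--
-- 	wrong = 0
--
-- 	#No wrong calls for hetero
-- 	if(pred != 'H'):
-- 		for site in sequence:
-- 			if(site[0] != pred):
-- 				wrong = wrong + 1
--
-- 	return wrong
-- ===== SOURCE B (Python) =====
-- def findBestCut(sequence, oldPred, newPred):
-- 	"""Finds the cut point to transition from oldPred to newPred.
-- 	One pass with running wrong-counts instead of re-scanning both slices per cut."""
-- 	n = len(sequence)
-- 	newWrong = 0 if newPred == 'H' else sum(1 for site in sequence if site[0] != newPred)
-- 	best, bestWrong = 0, n + 1
-- 	oldWrong = 0
-- 	for i, site in enumerate(sequence):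
-- 		wrong = oldWrong + newWrong
-- 		if wrong < bestWrong:
-- 			best, bestWrong = i, wrong
-- 		if oldPred != 'H' and site[0] != oldPred:
-- 			oldWrong += 1
-- 		if newPred != 'H' and site[0] != newPred:
-- 			newWrong -= 1
-- 	return best
-- ===== Notes on version B (the rewrite author's own statement) =====
-- stated objective: faster
-- what changed: Replaces the per-cut re-scan of both slices with a single pass that maintains running prefix/suffix wrong-counts, evaluating each cut in O(1).
-- outside the precondition, e.g. on findBestCut(['x', ''], 'x', 'H'): A returns 0, B raises IndexError
import Mathlib
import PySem

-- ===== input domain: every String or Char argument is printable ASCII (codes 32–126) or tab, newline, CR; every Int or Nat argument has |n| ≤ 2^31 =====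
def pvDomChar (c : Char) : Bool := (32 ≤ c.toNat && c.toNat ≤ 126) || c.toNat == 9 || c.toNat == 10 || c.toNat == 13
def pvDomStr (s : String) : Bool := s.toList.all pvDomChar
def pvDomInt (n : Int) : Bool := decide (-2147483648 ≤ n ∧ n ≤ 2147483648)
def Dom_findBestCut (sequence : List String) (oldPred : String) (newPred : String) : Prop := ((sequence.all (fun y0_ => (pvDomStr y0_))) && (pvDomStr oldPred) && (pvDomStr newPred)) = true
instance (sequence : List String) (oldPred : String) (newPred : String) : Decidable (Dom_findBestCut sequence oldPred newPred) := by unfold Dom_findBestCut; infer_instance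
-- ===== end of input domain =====

-- B replaces A's per-cut re-scan of both slices with one pass over running wrong-counts (O(n) vs O(n^2)).

-- ===== PORT A =====
-- site[0] as a 1-char Python string; pyGet? is some on every admitted input (Pre_ excludes empty sites);
-- the "" default is only reached outside Pre_.
def pvHeadStr (s : String) : String :=
  match PySem.Str.pyGet? s 0 with
  | some c => String.mk [c]
  | none => ""

def callWrong (seq : List String) (pred : String) : Int :=
  if pred ≠ "H" then
    seq.foldl (fun w site => if pvHeadStr site ≠ pred then w + 1 else w) 0
  else 0

def findBestCut (sequence : List String) (oldPred : String) (newPred : String) : Int :=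
  let n : Int := sequence.length
  let st := (PySem.List.pyRange 0 n 1).foldl
    (fun (st : Int × Int) i =>
      let wrong := callWrong (PySem.List.slice sequence none (some i)) oldPred
                 + callWrong (PySem.List.slice sequence (some i) none) newPred
      if wrong < st.2 then (i, wrong) else st)
    (0, n + 1)
  st.1

-- ===== PORT B =====
-- transliteration of Source B: precompute total suffix wrong-count, then one enumerate loop
-- (written as structural recursion carrying the index i and the two running counters).
def altLoop (oldPred newPred : String) : List String → Int → Int × Int → Int → Int → Int × Int
  | [], _, st, _, _ => st
  | site :: rest, i, st, oldWrong, newWrong =>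
    let wrong := oldWrong + newWrong
    let st' := if wrong < st.2 then (i, wrong) else st
    let oldWrong' := if oldPred ≠ "H" ∧ pvHeadStr site ≠ oldPred then oldWrong + 1 else oldWrong
    let newWrong' := if newPred ≠ "H" ∧ pvHeadStr site ≠ newPred then newWrong - 1 else newWrong
    altLoop oldPred newPred rest (i + 1) st' oldWrong' newWrong'

def findBestCut_alt (sequence : List String) (oldPred : String) (newPred : String) : Int :=
  let n : Int := sequence.length
  let newWrong : Int :=
    if newPred = "H" then 0
    else sequence.foldl (fun a site => if pvHeadStr site ≠ newPred then a + 1 else a) 0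
  (altLoop oldPred newPred sequence 0 (0, n + 1) 0 newWrong).1

-- ===== PRECONDITION & SPEC =====
-- Pre_ excludes sequences containing an empty-string site (unless both predictions are 'H', which
-- skips all indexing): A raises IndexError on site[0] there for most cut positions, and whether a
-- trailing empty site escapes indexing is an accident of which slices A's loop happens to scan.
def Pre_findBestCut (sequence : List String) (oldPred : String) (newPred : String) : Prop :=
  (oldPred = "H" ∧ newPred = "H") ∨ "" ∉ sequence
instance (sequence : List String) (oldPred : String) (newPred : String) : Decidable (Pre_findBestCut sequence oldPred newPred) := by unfold Pre_findBestCut; infer_instance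

def pvWitness_findBestCut : List String × String × String := (["x", "y", "y"], "x", "y")

def Spec_findBestCut (sequence : List String) (oldPred : String) (newPred : String) (out : Int) : Prop := out = findBestCut_alt sequence oldPred newPred
instance (sequence : List String) (oldPred : String) (newPred : String) (out : Int) : Decidable (Spec_findBestCut sequence oldPred newPred out) := by unfold Spec_findBestCut; infer_instance

-- ===== CLAIM (what is proved, stated in full; the proofs are below) =====
def Claim_equal_findBestCut : Prop := ∀ (sequence : List String) (oldPred : String) (newPred : String), Dom_findBestCut sequence oldPred newPred → Pre_findBestCut sequence oldPred newPred → Spec_findBestCut sequence oldPred newPred (findBestCut sequence oldPred newPred)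

-- ===== LEMMAS AND PROOFS =====

-- 0/1 mis-prediction flag of one site (proof-side abstraction of both counters)
def pvFlag (pred site : String) : Int :=
  if pred ≠ "H" ∧ pvHeadStr site ≠ pred then 1 else 0

def pvSum (pred : String) (l : List String) : Int := (l.map (pvFlag pred)).sum

theorem pvSum_nil (pred : String) : pvSum pred [] = 0 := rfl

theorem pvSum_cons (pred : String) (s : String) (l : List String) :
    pvSum pred (s :: l) = pvFlag pred s + pvSum pred l := by
  simp [pvSum, List.map_cons, List.sum_cons]

theorem pvSum_append (pred : String) (l₁ l₂ : List String) :
    pvSum pred (l₁ ++ l₂) = pvSum pred l₁ + pvSum pred l₂ := by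
  simp [pvSum]

theorem callWrong_eq_pvSum (seq : List String) (pred : String) :
    callWrong seq pred = pvSum pred seq := by
  unfold callWrong
  by_cases h : pred = "H"
  · subst h
    simp only [ne_eq, not_true_eq_false, if_false]
    induction seq with
    | nil => simp [pvSum]
    | cons s l ih => rw [pvSum_cons, ← ih]; simp [pvFlag]
  · simp only [ne_eq, h, not_false_eq_true, if_true]
    have key : ∀ (l : List String) (a : Int),
        l.foldl (fun w site => if pvHeadStr site ≠ pred then w + 1 else w) a = a + pvSum pred l := by
      intro l
      induction l with
      | nil => intro a; simp [pvSum]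
      | cons s l ih =>
        intro a
        rw [List.foldl_cons, ih, pvSum_cons]
        by_cases hs : pvHeadStr s ≠ pred <;> simp [pvFlag, hs, h] <;> ring
    rw [key]; ring

theorem pvFlag_eq_foldStep (pred site : String) (w : Int) :
    (if pred ≠ "H" ∧ pvHeadStr site ≠ pred then w + 1 else w) = w + pvFlag pred site := by
  unfold pvFlag; split_ifs <;> simp

theorem pvFlag_sub (pred site : String) (s : Int) :
    (if pred ≠ "H" ∧ pvHeadStr site ≠ pred then pvFlag pred site + s - 1 else pvFlag pred site + s)
    = s := by
  unfold pvFlag; split_ifs <;> ring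

-- the main bridge: A's remaining range-fold over (pre ++ rest) equals B's loop over rest,
-- with the counters holding pre's old-wrong sum and rest's new-wrong sum
theorem pvBridge (oldPred newPred : String) (seq : List String) :
    ∀ (rest pre : List String), seq = pre ++ rest → ∀ (st : Int × Int),
    (PySem.List.pyRange (pre.length : Int) (seq.length : Int) 1).foldl
      (fun (st : Int × Int) i =>
        let wrong := callWrong (PySem.List.slice seq none (some i)) oldPred
                   + callWrong (PySem.List.slice seq (some i) none) newPred
        if wrong < st.2 then (i, wrong) else st) st
    = altLoop oldPred newPred rest (pre.length : Int) st (pvSum oldPred pre) (pvSum newPred rest) := by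
  intro rest
  induction rest with
  | nil =>
    intro pre hseq st
    rw [PySem.List.pyRange_one_eq_nil]
    · simp [altLoop]
    · simp [hseq]
  | cons site rest ih =>
    intro pre hseq st
    have hlt : (pre.length : Int) < (seq.length : Int) := by
      subst hseq
      simp only [List.length_append, List.length_cons]
      push_cast
      omega
    rw [PySem.List.pyRange_one_cons hlt, List.foldl_cons]
    -- value of A's wrong at cut i = pre.length
    have htake : PySem.List.slice seq none (some (pre.length : Int)) = pre := by
      rw [PySem.List.slice_to_natCast, hseq, List.take_left]
    have hdrop : PySem.List.slice seq (some (pre.length : Int)) none = site :: rest := by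
      rw [PySem.List.slice_from_natCast, hseq, List.drop_left]
    have hpre1 : ((pre ++ [site]).length : Int) = (pre.length : Int) + 1 := by
      simp
    have hseq' : seq = (pre ++ [site]) ++ rest := by simp [hseq]
    have := ih (pre ++ [site]) hseq'
    rw [hpre1] at this
    show (PySem.List.pyRange ((pre.length : Int) + 1) (seq.length : Int) 1).foldl _ _ = _
    rw [this]
    -- now both sides are altLoop on rest; align states and counters
    simp only [altLoop, htake, hdrop, callWrong_eq_pvSum, pvSum_append, pvSum_cons, pvSum_nil,
      pvFlag_eq_foldStep, pvFlag_sub, add_zero]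

theorem newWrong_init (newPred : String) (seq : List String) :
    (if newPred = "H" then (0 : Int)
     else seq.foldl (fun a site => if pvHeadStr site ≠ newPred then a + 1 else a) 0)
    = pvSum newPred seq := by
  by_cases h : newPred = "H"
  · subst h
    simp only [if_true]
    induction seq with
    | nil => simp [pvSum]
    | cons s l ih => rw [pvSum_cons, ← ih]; simp [pvFlag]
  · rw [if_neg h, ← callWrong_eq_pvSum]
    unfold callWrong
    rw [if_pos h]

-- ===== VERDICT (by name: the statement is the Claim_ definition above) =====
theorem findBestCut_spec : Claim_equal_findBestCut := by
  intro sequence oldPred newPred _hdom _hpre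
  unfold Spec_findBestCut findBestCut findBestCut_alt
  simp only [newWrong_init]
  have h := pvBridge oldPred newPred sequence sequence [] rfl
    ((0 : Int), (sequence.length : Int) + 1)
  simp only [List.length_nil, Nat.cast_zero, pvSum_nil] at h
  exact congrArg Prod.fst h
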